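-- pv_equiv track=rewrite | github.com/DFKI-NLP/low-resource | low_resource/data/data_utils.py | to_iob1
-- ===== SOURCE A (Python) =====
-- def to_iob1(instance, tag_type):
--     # encode all tags as "inside" (I-) tags
--     last_t = None
--     for t_idx, t in enumerate(instance[tag_type]):
--         if instance[tag_type][t_idx] != 'O':
--             if t != last_t:
--                 instance[tag_type][t_idx] = 'B-' + t
--             else:
--                 instance[tag_type][t_idx] = 'I-' + t
--         last_t = t
--     #for t_idx in range(len(instance['pos'])):
--     #    if instance['pos'][t_idx] != 'O':
--     #        instance['pos'][t_idx] = 'I-' + instance['pos'][t_idx]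
--     return instance
-- ===== SOURCE B (Python) =====
-- def to_iob1(instance, tag_type):
--     # Run-grouping rewrite: build the relabelled list run by run, then splice
--     # it back in place (same mutation of instance[tag_type] as the original).
--     tags = instance[tag_type]
--     new = []
--     i = 0
--     n = len(tags)
--     while i < n:
--         t = tags[i]
--         j = i + 1
--         while j < n and tags[j] == t:
--             j += 1
--         if t == 'O':
--             new.extend(['O'] * (j - i))
--         else:
--             new.append('B-' + t)
--             new.extend(['I-' + t] * (j - i - 1))
--         i = j
--     tags[:] = new
--     return instance
-- ===== Notes on version B (the rewrite author's own statement) =====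
-- stated objective: alternative
-- what changed: Replaces A's single pass carrying a last_t state variable with an explicit run-grouping traversal: split the tag list into maximal runs of equal tags, leave 'O' runs unchanged, and label each other run B- then I-, splicing the result back in place.
import Mathlib
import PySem

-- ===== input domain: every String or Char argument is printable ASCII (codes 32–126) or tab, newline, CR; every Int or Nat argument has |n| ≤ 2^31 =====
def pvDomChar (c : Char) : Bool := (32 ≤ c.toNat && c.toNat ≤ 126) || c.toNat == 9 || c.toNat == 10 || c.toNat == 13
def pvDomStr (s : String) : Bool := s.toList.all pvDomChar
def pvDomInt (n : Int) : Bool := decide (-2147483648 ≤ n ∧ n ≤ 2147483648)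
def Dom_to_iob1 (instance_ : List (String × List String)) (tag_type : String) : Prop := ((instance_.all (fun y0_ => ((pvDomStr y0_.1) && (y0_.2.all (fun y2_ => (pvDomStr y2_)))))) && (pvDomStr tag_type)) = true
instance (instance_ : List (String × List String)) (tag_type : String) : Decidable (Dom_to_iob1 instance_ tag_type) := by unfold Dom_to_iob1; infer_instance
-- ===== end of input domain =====

-- B replaces A's previous-tag state variable by an explicit run-grouping traversal
-- (label each run of equal non-'O' tags B- then I-); objective: alternative decomposition.
-- Both programs mutate instance[tag_type] in place; the equivalence proved here is about
-- the returned dict (which carries that same mutation).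

-- ===== PORT A =====
-- A's for-loop over enumerate(instance[tag_type]) with the last_t state variable.
-- (Python reads instance[tag_type][t_idx] before overwriting it, so each step sees
-- the ORIGINAL tag t; last_t is also the original tag.)
def pvALoop : List String → Option String → List String
  | [], _ => []
  | t :: rest, last =>
      (if t ≠ "O" then (if some t ≠ last then "B-" ++ t else "I-" ++ t) else t)
        :: pvALoop rest (some t)

-- in-place mutation of the list object held by the dict: the value at the first
-- occurrence of the key is replaced, everything else (incl. key order) unchanged
def pvAStore : List (String × List String) → String → List String → List (String × List String)
  | [], _, _ => []
  | (k, v) :: rest, key, nv =>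
      if k == key then (k, nv) :: rest else (k, v) :: pvAStore rest key nv

def to_iob1 (instance_ : List (String × List String)) (tag_type : String) : List (String × List String) :=
  match List.lookup tag_type instance_ with
  | none => instance_   -- Python raises KeyError here; excluded by Pre_to_iob1
  | some tags => pvAStore instance_ tag_type (pvALoop tags none)

-- ===== PORT B =====
-- Source B's outer while loop: peel off one maximal run of equal tags per step
-- (the inner `while tags[j] == t` scan is the takeWhile/dropWhile split).
def pvBRuns : List String → List String
  | [] => []
  | t :: rest =>
      (if t == "O" then List.replicate ((rest.takeWhile (fun x => x == t)).length + 1) "O"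
       else ("B-" ++ t) :: List.replicate (rest.takeWhile (fun x => x == t)).length ("I-" ++ t))
        ++ pvBRuns (rest.dropWhile (fun x => x == t))
termination_by xs => xs.length
decreasing_by
  simp only [List.length_cons]
  exact Nat.lt_succ_of_le (List.length_dropWhile_le _ _)

-- Source B's `tags[:] = new`: splice the new list into the dict's list object in place,
-- modelled as splitting the association list around the key's first occurrence
def pvBSplice (d : List (String × List String)) (key : String) (nv : List String) :
    List (String × List String) :=
  d.takeWhile (fun kv => !(kv.1 == key)) ++
    (match d.dropWhile (fun kv => !(kv.1 == key)) with
     | [] => []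
     | kv :: tl => (kv.1, nv) :: tl)

def to_iob1_alt (instance_ : List (String × List String)) (tag_type : String) : List (String × List String) :=
  -- (Source B raises KeyError when the key is absent; excluded by Pre_to_iob1, nothing claimed there)
  (List.lookup tag_type instance_).elim []
    (fun tags => pvBSplice instance_ tag_type (pvBRuns tags))

-- ===== PRECONDITION & SPEC =====
-- Pre_ excludes only the inputs where instance[tag_type] raises KeyError in both programs.
def Pre_to_iob1 (instance_ : List (String × List String)) (tag_type : String) : Prop :=
  (List.lookup tag_type instance_).isSome
instance (instance_ : List (String × List String)) (tag_type : String) : Decidable (Pre_to_iob1 instance_ tag_type) := by unfold Pre_to_iob1; infer_instance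

def pvWitness_to_iob1 : (List (String × List String)) × String :=
  ([("ner", ["O", "PER", "PER", "O", "LOC"])], "ner")

def Spec_to_iob1 (instance_ : List (String × List String)) (tag_type : String) (out : List (String × List String)) : Prop := out = to_iob1_alt instance_ tag_type
instance (instance_ : List (String × List String)) (tag_type : String) (out : List (String × List String)) : Decidable (Spec_to_iob1 instance_ tag_type out) := by unfold Spec_to_iob1; infer_instance

-- ===== CLAIM (what is proved, stated in full; the proofs are below) =====
def Claim_equal_to_iob1 : Prop := ∀ (instance_ : List (String × List String)) (tag_type : String), Dom_to_iob1 instance_ tag_type → Pre_to_iob1 instance_ tag_type → Spec_to_iob1 instance_ tag_type (to_iob1 instance_ tag_type)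

-- ===== LEMMAS AND PROOFS =====

lemma pvStore_eq (l : List (String × List String)) (k : String) (v : List String) :
    pvAStore l k v = pvBSplice l k v := by
  induction l with
  | nil => rfl
  | cons p rest ih =>
    obtain ⟨pk, pv⟩ := p
    by_cases h : pk = k
    · subst h
      simp [pvAStore, pvBSplice]
    · simp only [pvAStore, pvBSplice, List.takeWhile_cons, List.dropWhile_cons] at *
      simp [h] at *
      exact ih

-- The heart of the proof: A's stateful pass agrees with B's run grouping.
-- First conjunct: when the carried last-tag differs from the head, both passes agree.
-- Second conjunct: inside a run of t's, A emits the run tail B emits.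
lemma pvKey : ∀ n : Nat,
    (∀ (xs : List String) (l : Option String), xs.length ≤ n →
        (∀ h : String, xs.head? = some h → l ≠ some h) → pvALoop xs l = pvBRuns xs)
    ∧
    (∀ (xs : List String) (t : String), xs.length ≤ n →
        pvALoop xs (some t) =
          List.replicate (xs.takeWhile (fun x => x == t)).length
              (if t = "O" then "O" else "I-" ++ t)
            ++ pvBRuns (xs.dropWhile (fun x => x == t))) := by
  intro n
  induction n with
  | zero =>
    constructor
    · intro xs l hlen _
      have : xs = [] := List.eq_nil_of_length_eq_zero (Nat.le_zero.mp hlen)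
      subst this; simp [pvALoop, pvBRuns]
    · intro xs t hlen
      have : xs = [] := List.eq_nil_of_length_eq_zero (Nat.le_zero.mp hlen)
      subst this; simp [pvALoop, pvBRuns]
  | succ n ih =>
    have hP : ∀ (xs : List String) (l : Option String), xs.length ≤ n + 1 →
        (∀ h : String, xs.head? = some h → l ≠ some h) → pvALoop xs l = pvBRuns xs := by
      intro xs l hlen hh
      cases xs with
      | nil => simp [pvALoop, pvBRuns]
      | cons t rest =>
        have hlen' : rest.length ≤ n := by simpa using hlen
        have hQ := ih.2 rest t hlen'
        have hlneq : l ≠ some t := hh t rfl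
        by_cases ht : t = "O"
        · subst ht
          simp only [pvALoop, pvBRuns, hQ, beq_self_eq_true, ite_not,
            List.replicate_succ]
          simp
        · have hne : some t ≠ l := fun h => hlneq h.symm
          simp only [pvALoop, pvBRuns, hQ]
          simp [ht, hne]
    have hQ : ∀ (xs : List String) (t : String), xs.length ≤ n + 1 →
        pvALoop xs (some t) =
          List.replicate (xs.takeWhile (fun x => x == t)).length
              (if t = "O" then "O" else "I-" ++ t)
            ++ pvBRuns (xs.dropWhile (fun x => x == t)) := by
      intro xs t hlen
      cases xs with
      | nil => simp [pvALoop, pvBRuns]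
      | cons r rs =>
        by_cases hr : r = t
        · subst hr
          have hlen' : rs.length ≤ n := by simpa using hlen
          have hrec := ih.2 rs r hlen'
          by_cases hO : r = "O"
          · subst hO
            simp only [pvALoop, hrec, List.takeWhile_cons, List.dropWhile_cons,
              beq_self_eq_true]
            simp [List.replicate_succ]
          · simp only [pvALoop, hrec, List.takeWhile_cons, List.dropWhile_cons,
              beq_self_eq_true]
            simp [hO, List.replicate_succ]
        · have htw : (r :: rs).takeWhile (fun x => x == t) = [] := by
            simp [hr]
          have hdw : (r :: rs).dropWhile (fun x => x == t) = r :: rs := by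
            simp [hr]
          rw [htw, hdw]
          simp only [List.length_nil, List.replicate_zero, List.nil_append]
          exact hP (r :: rs) (some t) hlen
            (fun h hh hcontra => by
              simp only [List.head?_cons, Option.some.injEq] at hh
              exact hr (by rw [hh]; exact (Option.some.injEq _ _).mp hcontra.symm ▸ rfl))
    exact ⟨hP, hQ⟩

lemma pvLoop_eq_runs (xs : List String) : pvALoop xs none = pvBRuns xs :=
  (pvKey xs.length).1 xs none le_rfl (fun _ _ => by simp)

-- ===== VERDICT (by name: the statement is the Claim_ definition above) =====
theorem to_iob1_spec : Claim_equal_to_iob1 := by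
  intro instance_ tag_type _ hpre
  unfold Spec_to_iob1 to_iob1 to_iob1_alt
  unfold Pre_to_iob1 at hpre
  cases hl : List.lookup tag_type instance_ with
  | none => rw [hl] at hpre; exact absurd hpre (by simp)
  | some tags => simp only [Option.elim_some, pvLoop_eq_runs, pvStore_eq]
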